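-- pv_equiv track=rewrite | github.com/60jong/ProblemSolving | solved_ac/BOJ/BFS/테트로미노.py | calShape5
-- ===== SOURCE A (Python) =====
-- def calShape5(scores): # [z] -> 4개 존재
--     maxScore = 0
--     # [z]
--     for y in range(len(scores) - 1):
--         for x in range(len(scores[0]) - 2):
--             score = scores[y][x] + scores[y][x + 1] + scores[y + 1][x + 1] + scores[y + 1][x + 2]
--             if score > maxScore:
--                 maxScore = score
--     # [z] 90도 회전 N
--     for y in range(1, len(scores) - 1):
--         for x in range(len(scores[0]) - 1):
--             score = scores[y][x] + scores[y + 1][x] + scores[y][x + 1] + scores[y - 1][x + 1]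
--             if score > maxScore:
--                 maxScore = score
--     # [z] 대칭
--     for y in range(1, len(scores)):
--         for x in range(len(scores[0]) - 2):
--             score = scores[y][x] + scores[y][x + 1] + scores[y - 1][x + 1] + scores[y - 1][x + 2]
--             if score > maxScore:
--                 maxScore = score
--     # [z] 90도 회전 대칭
--     for y in range(len(scores) - 2):
--         for x in range(len(scores[0]) - 1):
--             score = scores[y][x] + scores[y + 1][x] + scores[y + 1][x + 1] + scores[y + 2][x + 1]
--             if score > maxScore:
--                 maxScore = score
--     return maxScore
-- ===== SOURCE B (Python) =====
-- # Transpose/symmetry decomposition: one helper scans adjacent row pairs for the two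
-- # horizontal Z/S shapes; the vertical orientations are the same scan on the transposed grid.
-- def calShape5(scores):
--     def best_pairs(rows, width):
--         best = 0
--         for a, b in zip(rows, rows[1:]):
--             for x in range(width - 2):
--                 best = max(best,
--                            a[x] + a[x + 1] + b[x + 1] + b[x + 2],
--                            b[x] + b[x + 1] + a[x + 1] + a[x + 2])
--         return best
--     h = len(scores)
--     w = len(scores[0]) if scores else 0
--     cols = [[scores[y][x] for y in range(h)] for x in range(w)]
--     return max(best_pairs(scores, w), best_pairs(cols, h))
-- ===== Notes on version B (the rewrite author's own statement) =====
-- stated objective: simpler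
-- what changed: Replaces A's four orientation-specific double loop nests by one shared helper that scans adjacent row pairs for the two horizontal Z/S shapes, applied to the grid and to its explicit transpose (the vertical orientations are the horizontal ones on the transpose). Pre_ excludes ragged grids (a row shorter than row 0), where A raises IndexError whenever it reads the short row and B's transpose comprehension always raises IndexError.
-- outside the precondition, e.g. on calShape5([[1, 2], [3]]): A returns 0, B raises IndexError
import Mathlib
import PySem

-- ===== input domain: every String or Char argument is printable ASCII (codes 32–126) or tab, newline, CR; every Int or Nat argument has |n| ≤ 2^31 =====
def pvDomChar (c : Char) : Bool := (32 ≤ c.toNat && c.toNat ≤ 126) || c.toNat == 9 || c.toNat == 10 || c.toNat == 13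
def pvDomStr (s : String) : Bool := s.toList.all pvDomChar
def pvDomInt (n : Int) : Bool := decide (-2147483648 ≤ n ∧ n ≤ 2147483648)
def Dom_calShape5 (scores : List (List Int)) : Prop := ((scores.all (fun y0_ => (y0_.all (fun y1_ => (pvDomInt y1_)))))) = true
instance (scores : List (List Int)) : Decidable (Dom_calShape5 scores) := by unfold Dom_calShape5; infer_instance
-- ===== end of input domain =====

-- B replaces A's four orientation-specific double loop nests by one shared helper that scans
-- adjacent row pairs for the two horizontal Z/S shapes, run on the grid and on its transpose
-- (the vertical orientations are the horizontal ones on the transposed grid); objective: simpler.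

-- shared indexing helper: scores[y][x] (both Pythons index the grid this way; in-range under Pre_)
def pvGrid (scores : List (List Int)) (y x : Int) : Int :=
  PySem.List.pyGetD (PySem.List.pyGetD scores y []) x 0

-- ===== PORT A =====
def calShape5 (scores : List (List Int)) : Int :=
  let h : Int := scores.length
  let w : Int := (PySem.List.pyGetD scores 0 []).length
  let m1 := (PySem.List.pyRange 0 (h - 1) 1).foldl (fun acc y =>
    (PySem.List.pyRange 0 (w - 2) 1).foldl (fun acc x =>
      let score := pvGrid scores y x + pvGrid scores y (x+1) + pvGrid scores (y+1) (x+1) + pvGrid scores (y+1) (x+2)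
      if score > acc then score else acc) acc) 0
  let m2 := (PySem.List.pyRange 1 (h - 1) 1).foldl (fun acc y =>
    (PySem.List.pyRange 0 (w - 1) 1).foldl (fun acc x =>
      let score := pvGrid scores y x + pvGrid scores (y+1) x + pvGrid scores y (x+1) + pvGrid scores (y-1) (x+1)
      if score > acc then score else acc) acc) m1
  let m3 := (PySem.List.pyRange 1 h 1).foldl (fun acc y =>
    (PySem.List.pyRange 0 (w - 2) 1).foldl (fun acc x =>
      let score := pvGrid scores y x + pvGrid scores y (x+1) + pvGrid scores (y-1) (x+1) + pvGrid scores (y-1) (x+2)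
      if score > acc then score else acc) acc) m2
  let m4 := (PySem.List.pyRange 0 (h - 2) 1).foldl (fun acc y =>
    (PySem.List.pyRange 0 (w - 1) 1).foldl (fun acc x =>
      let score := pvGrid scores y x + pvGrid scores (y+1) x + pvGrid scores (y+1) (x+1) + pvGrid scores (y+2) (x+1)
      if score > acc then score else acc) acc) m3
  m4

-- ===== PORT B =====
-- best_pairs(rows, width): scan adjacent row pairs for the two horizontal Z/S shapes
def pvBestPairs (rows : List (List Int)) (width : Int) : Int :=
  (rows.zip rows.tail).foldl (fun best ab =>
    (PySem.List.pyRange 0 (width - 2) 1).foldl (fun best x =>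
      max (max best
        (PySem.List.pyGetD ab.1 x 0 + PySem.List.pyGetD ab.1 (x+1) 0 +
         PySem.List.pyGetD ab.2 (x+1) 0 + PySem.List.pyGetD ab.2 (x+2) 0))
        (PySem.List.pyGetD ab.2 x 0 + PySem.List.pyGetD ab.2 (x+1) 0 +
         PySem.List.pyGetD ab.1 (x+1) 0 + PySem.List.pyGetD ab.1 (x+2) 0)) best) 0

def calShape5_alt (scores : List (List Int)) : Int :=
  let h : Int := scores.length
  let w : Int := if scores = [] then 0 else ((PySem.List.pyGetD scores 0 []).length : Int)
  let cols := (PySem.List.pyRange 0 w 1).map (fun x =>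
    (PySem.List.pyRange 0 h 1).map (fun y => PySem.List.pyGetD (PySem.List.pyGetD scores y []) x 0))
  max (pvBestPairs scores w) (pvBestPairs cols h)

-- ===== PRECONDITION & SPEC =====
-- Pre_ excludes ragged grids (a row shorter than row 0): there A raises IndexError whenever it
-- actually reads the short row, and B's transpose comprehension always raises IndexError.
def Pre_calShape5 (scores : List (List Int)) : Prop :=
  ∀ r ∈ scores, (scores.headD []).length ≤ r.length
instance (scores : List (List Int)) : Decidable (Pre_calShape5 scores) := by
  unfold Pre_calShape5; infer_instance

def pvWitness_calShape5 : List (List Int) := [[1, 2, 3], [4, 5, 6]]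

def Spec_calShape5 (scores : List (List Int)) (out : Int) : Prop := out = calShape5_alt scores
instance (scores : List (List Int)) (out : Int) : Decidable (Spec_calShape5 scores out) := by
  unfold Spec_calShape5; infer_instance

-- ===== CLAIM (what is proved, stated in full; the proofs are below) =====
def Claim_equal_calShape5 : Prop := ∀ (scores : List (List Int)), Dom_calShape5 scores → Pre_calShape5 scores → Spec_calShape5 scores (calShape5 scores)

-- ===== LEMMAS AND PROOFS =====

-- "if s > a then s else a" is a running max
theorem pv_if_max (a s : Int) : (if s > a then s else a) = max a s := by
  by_cases h : s > a <;> simp [max_def, h] <;> omega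

-- a nested loop folding max equals folding max over the flattened candidate list
theorem pv_foldl_max_flatMap {α : Type} (l : List α) (g : α → List Int) (i : Int) :
    l.foldl (fun acc y => (g y).foldl max acc) i = (l.flatMap g).foldl max i := by
  induction l generalizing i with
  | nil => rfl
  | cons a t ih => simp [List.foldl_append, ih]

theorem pv_flatMap_congr {α β : Type} (l : List α) (f g : α → List β)
    (h : ∀ x ∈ l, f x = g x) : l.flatMap f = l.flatMap g := by
  induction l with
  | nil => rfl
  | cons a t ih =>
    simp only [List.flatMap_cons]
    rw [h a (by simp), ih (fun x hx => h x (by simp [hx]))]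

theorem pv_flatMap_append_perm {α β : Type} (l : List α) (f g : α → List β) :
    (l.flatMap (fun x => f x ++ g x)).Perm (l.flatMap f ++ l.flatMap g) := by
  induction l with
  | nil => simp
  | cons a t ih =>
    simp only [List.flatMap_cons]
    refine (ih.append_left (f a ++ g a)).trans ?_
    simp only [List.append_assoc]
    exact (List.perm_append_comm_assoc _ _ _).append_left (f a)

theorem pv_flatMap_pure {α β : Type} (l : List α) (f : α → β) :
    l.flatMap (fun x => [f x]) = l.map f := by
  induction l with
  | nil => rfl
  | cons a t ih => simp [ih]

theorem pv_flatMap_perm_congr {α β : Type} (l : List α) (f g : α → List β)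
    (h : ∀ x ∈ l, (f x).Perm (g x)) : (l.flatMap f).Perm (l.flatMap g) := by
  induction l with
  | nil => simp
  | cons a t ih =>
    simp only [List.flatMap_cons]
    exact (h a (by simp)).append (ih (fun x hx => h x (by simp [hx])))

-- a nested double loop with a running "if score > acc" max is a fold of max over the candidates
theorem pv_loop_eq (Y X : List Int) (f : Int → Int → Int) (i : Int) :
    Y.foldl (fun acc y => X.foldl (fun acc x =>
      let score := f y x
      if score > acc then score else acc) acc) i
    = (Y.flatMap (fun y => X.map (f y))).foldl max i := by
  rw [← pv_foldl_max_flatMap]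
  congr 1
  funext acc y
  rw [List.foldl_map]
  congr 1
  funext a x
  exact pv_if_max a (f y x)

-- abbreviations for the grid dimensions
def pvH (s : List (List Int)) : Int := s.length
def pvW (s : List (List Int)) : Int := ((PySem.List.pyGetD s 0 []).length : Int)

-- the four placement sums, anchored exactly as in A's four loops
def pvS1 (s : List (List Int)) (y x : Int) : Int :=
  pvGrid s y x + pvGrid s y (x+1) + pvGrid s (y+1) (x+1) + pvGrid s (y+1) (x+2)
def pvS2 (s : List (List Int)) (y x : Int) : Int :=
  pvGrid s y x + pvGrid s (y+1) x + pvGrid s y (x+1) + pvGrid s (y-1) (x+1)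
def pvS3 (s : List (List Int)) (y x : Int) : Int :=
  pvGrid s y x + pvGrid s y (x+1) + pvGrid s (y-1) (x+1) + pvGrid s (y-1) (x+2)
def pvS4 (s : List (List Int)) (y x : Int) : Int :=
  pvGrid s y x + pvGrid s (y+1) x + pvGrid s (y+1) (x+1) + pvGrid s (y+2) (x+1)

-- one of A's loop nests, as a flat candidate list
def pvBlock (ylo yhi xhi : Int) (f : Int → Int → Int) : List Int :=
  (PySem.List.pyRange ylo yhi 1).flatMap (fun y => (PySem.List.pyRange 0 xhi 1).map (f y))

def pvLA (s : List (List Int)) : List Int :=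
  pvBlock 0 (pvH s - 1) (pvW s - 2) (pvS1 s) ++ pvBlock 1 (pvH s - 1) (pvW s - 1) (pvS2 s) ++
  pvBlock 1 (pvH s) (pvW s - 2) (pvS3 s) ++ pvBlock 0 (pvH s - 2) (pvW s - 1) (pvS4 s)

theorem pv_A_eq (s : List (List Int)) : calShape5 s = (pvLA s).foldl max 0 := by
  unfold calShape5 pvLA pvBlock pvS1 pvS2 pvS3 pvS4 pvH pvW
  simp only [pv_loop_eq, List.foldl_append]

-- B's two candidate lists
def pvLB1 (s : List (List Int)) : List Int :=
  (PySem.List.pyRange 0 (pvH s - 1) 1).flatMap (fun y =>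
    (PySem.List.pyRange 0 (pvW s - 2) 1).flatMap (fun x => [pvS1 s y x, pvS3 s (y+1) x]))
def pvLB2 (s : List (List Int)) : List Int :=
  (PySem.List.pyRange 0 (pvW s - 1) 1).flatMap (fun x =>
    (PySem.List.pyRange 0 (pvH s - 2) 1).flatMap (fun t => [pvS4 s t x, pvS2 s (t+1) x]))

theorem pv_loop2 {α : Type} (l : List α) (X : List Int) (c1 c2 : α → Int → Int) (i : Int) :
    l.foldl (fun best ab => X.foldl (fun best x => max (max best (c1 ab x)) (c2 ab x)) best) i
    = (l.flatMap (fun ab => X.flatMap (fun x => [c1 ab x, c2 ab x]))).foldl max i := by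
  rw [← pv_foldl_max_flatMap]
  congr 1
  funext acc ab
  rw [← pv_foldl_max_flatMap]
  rfl

theorem pv_pyGetD_cons {α : Type} (a : α) (t : List α) (i : Int) (d : α) (h : 0 ≤ i) :
    PySem.List.pyGetD (a :: t) (i + 1) d = PySem.List.pyGetD t i d := by
  obtain ⟨n, rfl⟩ := Int.eq_ofNat_of_zero_le h
  have : ((n : Int) + 1) = ((n + 1 : Nat) : Int) := by push_cast; ring
  rw [this, PySem.List.pyGetD_natCast, PySem.List.pyGetD_natCast]
  simp

theorem pv_range_shift {β : Type} (n : Int) (f : Int → β) :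
    (PySem.List.pyRange 0 n 1).map (fun y => f (y + 1)) = (PySem.List.pyRange 1 (n + 1) 1).map f := by
  rw [PySem.List.pyRange_one, PySem.List.pyRange_one]
  simp only [List.map_map]
  have : (n - 0).toNat = (n + 1 - 1).toNat := by omega
  rw [this]
  exact List.map_congr_left (fun k _ => by
    show f (0 + (k : Int) + 1) = f (1 + (k : Int))
    exact congrArg f (by ring))

theorem pv_flatMap_shift {β : Type} (n : Int) (G : Int → List β) :
    (PySem.List.pyRange 0 n 1).flatMap (fun y => G (y + 1)) = (PySem.List.pyRange 1 (n + 1) 1).flatMap G := by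
  rw [List.flatMap_def, List.flatMap_def, pv_range_shift]

theorem pv_zip_tail (l : List (List Int)) :
    l.zip l.tail = (PySem.List.pyRange 0 ((l.length : Int) - 1) 1).map
      (fun y => (PySem.List.pyGetD l y [], PySem.List.pyGetD l (y + 1) [])) := by
  induction l with
  | nil =>
    rw [PySem.List.pyRange_one_eq_nil (by simp)]
    rfl
  | cons a t ih =>
    cases t with
    | nil =>
      rw [PySem.List.pyRange_one_eq_nil (by simp)]
      rfl
    | cons b t2 =>
      have hpos : (0 : Int) < ((a :: b :: t2).length : Int) - 1 := by
        simp only [List.length_cons]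
        push_cast
        omega
      rw [PySem.List.pyRange_one_cons hpos, List.map_cons]
      have hhead : (PySem.List.pyGetD (a :: b :: t2) 0 [], PySem.List.pyGetD (a :: b :: t2) (0 + 1) []) = (a, b) := by
        rw [pv_pyGetD_cons a (b :: t2) 0 [] le_rfl, PySem.List.pyGetD_zero_cons, PySem.List.pyGetD_zero_cons]
      show (a, b) :: ((b :: t2).zip t2) = _
      rw [hhead]
      congr 1
      have hb : ((b :: t2).zip t2) = ((b :: t2).zip (b :: t2).tail) := rfl
      have heq : ((a :: b :: t2).length : Int) - 1 = (((b :: t2).length : Int) - 1) + 1 := by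
        simp only [List.length_cons]
        push_cast
        ring
      rw [hb, ih, show ((0 : Int) + 1) = 1 from rfl, heq,
        ← pv_range_shift (((b :: t2).length : Int) - 1)
          (fun y => (PySem.List.pyGetD (a :: b :: t2) y [], PySem.List.pyGetD (a :: b :: t2) (y + 1) []))]
      refine List.map_congr_left (fun y hy => ?_)
      have hm := (PySem.List.mem_pyRange_one).1 hy
      rw [show (y + 1 + 1 : Int) = (y + 1) + 1 from by ring,
        pv_pyGetD_cons a (b :: t2) (y + 1) [] (by omega),
        pv_pyGetD_cons a (b :: t2) y [] hm.1]

theorem pv_flatMap_comm {α β γ : Type} (l1 : List α) (l2 : List β) (g : α → β → γ) :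
    (l1.flatMap (fun x => l2.map (g x))).Perm (l2.flatMap (fun y => l1.map (fun x => g x y))) := by
  induction l1 with
  | nil => simp
  | cons a t ih =>
    simp only [List.flatMap_cons, List.map_cons]
    have h1 : (l2.flatMap fun y => g a y :: t.map (fun x => g x y)).Perm
        (l2.map (g a) ++ l2.flatMap fun y => t.map (fun x => g x y)) := by
      have h2 := pv_flatMap_append_perm l2 (fun y => [g a y]) (fun y => t.map (fun x => g x y))
      rw [pv_flatMap_pure] at h2
      exact h2
    exact (ih.append_left (l2.map (g a))).trans h1.symm

theorem pv_max_foldl (a b : Int) (l : List Int) :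
    l.foldl max (max a b) = max a (l.foldl max b) := by
  induction l generalizing b with
  | nil => rfl
  | cons c t ih =>
    simp only [List.foldl_cons]
    rw [max_assoc, ih]

theorem pv_max_split (L1 L2 : List Int) :
    max (L1.foldl max 0) (L2.foldl max 0) = (L1 ++ L2).foldl max 0 := by
  rw [List.foldl_append]
  have h0 : (0 : Int) ≤ L1.foldl max 0 := (PySem.List.le_foldl_max L1 0).1
  have h := pv_max_foldl (L1.foldl max 0) 0 L2
  rw [max_eq_left h0] at h
  exact h.symm

theorem pv_B1_eq (s : List (List Int)) :
    pvBestPairs s (pvW s) = (pvLB1 s).foldl max 0 := by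
  unfold pvBestPairs pvLB1
  rw [pv_loop2, pv_zip_tail, List.flatMap_map]
  congr 1
  refine pv_flatMap_congr _ _ _ (fun y _ => ?_)
  refine pv_flatMap_congr _ _ _ (fun x _ => ?_)
  show [_, _] = [_, _]
  unfold pvS1 pvS3 pvGrid
  rw [show (y + 1 - 1 : Int) = y by ring]

theorem pv_B2_eq (s : List (List Int)) :
    pvBestPairs ((PySem.List.pyRange 0 (pvW s) 1).map (fun x =>
      (PySem.List.pyRange 0 (pvH s) 1).map (fun y => pvGrid s y x))) (pvH s)
      = (pvLB2 s).foldl max 0 := by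
  set cols := (PySem.List.pyRange 0 (pvW s) 1).map (fun x =>
    (PySem.List.pyRange 0 (pvH s) 1).map (fun y => pvGrid s y x)) with hcols
  have hw0 : (0 : Int) ≤ pvW s := by unfold pvW; exact Int.natCast_nonneg _
  have hclen : ((cols.length : Int)) = pvW s := by
    rw [hcols]
    simp only [List.length_map, PySem.List.length_pyRange_one]
    omega
  unfold pvBestPairs pvLB2
  rw [pv_loop2, pv_zip_tail, List.flatMap_map, hclen]
  congr 1
  refine pv_flatMap_congr _ _ _ (fun x hx => ?_)
  have hxm := (PySem.List.mem_pyRange_one).1 hx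
  have hc1 : (PySem.List.pyGetD cols x [], PySem.List.pyGetD cols (x + 1) []).1
      = (PySem.List.pyRange 0 (pvH s) 1).map (fun y => pvGrid s y x) := by
    show PySem.List.pyGetD cols x [] = _
    rw [hcols]
    exact PySem.List.pyGetD_map_pyRange_of_nonneg _ (pvW s) x [] hxm.1 (by omega)
  have hc2 : (PySem.List.pyGetD cols x [], PySem.List.pyGetD cols (x + 1) []).2
      = (PySem.List.pyRange 0 (pvH s) 1).map (fun y => pvGrid s y (x + 1)) := by
    show PySem.List.pyGetD cols (x + 1) [] = _
    rw [hcols]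
    exact PySem.List.pyGetD_map_pyRange_of_nonneg _ (pvW s) (x + 1) [] (by omega) (by omega)
  refine pv_flatMap_congr _ _ _ (fun t ht => ?_)
  have htm := (PySem.List.mem_pyRange_one).1 ht
  have hget : ∀ (u v : Int), 0 ≤ u → u < pvH s →
      PySem.List.pyGetD ((PySem.List.pyRange 0 (pvH s) 1).map (fun y => pvGrid s y v)) u 0 = pvGrid s u v :=
    fun u v h1 h2 => PySem.List.pyGetD_map_pyRange_of_nonneg _ (pvH s) u 0 h1 h2
  rw [hc1, hc2,
      hget t x htm.1 (by omega), hget (t + 1) x (by omega) (by omega),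
      hget (t + 1) (x + 1) (by omega) (by omega), hget (t + 2) (x + 1) (by omega) (by omega),
      hget t (x + 1) htm.1 (by omega), hget (t + 2) x (by omega) (by omega)]
  unfold pvS4 pvS2
  rw [show (t + 1 - 1 : Int) = t by ring, show (t + 1 + 1 : Int) = t + 2 by ring]
  congr 2
  ring

theorem pv_LB1_perm (s : List (List Int)) :
    (pvLB1 s).Perm (pvBlock 0 (pvH s - 1) (pvW s - 2) (pvS1 s) ++ pvBlock 1 (pvH s) (pvW s - 2) (pvS3 s)) := by
  unfold pvLB1
  have step1 : ∀ y : Int, ((PySem.List.pyRange 0 (pvW s - 2) 1).flatMap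
      (fun x => [pvS1 s y x, pvS3 s (y+1) x])).Perm
      ((PySem.List.pyRange 0 (pvW s - 2) 1).map (pvS1 s y) ++
       (PySem.List.pyRange 0 (pvW s - 2) 1).map (pvS3 s (y+1))) := by
    intro y
    have : (fun x => [pvS1 s y x, pvS3 s (y+1) x]) = fun x => [pvS1 s y x] ++ [pvS3 s (y+1) x] := rfl
    rw [this]
    refine (pv_flatMap_append_perm _ _ _).trans ?_
    rw [pv_flatMap_pure, pv_flatMap_pure]
  refine (pv_flatMap_perm_congr _ _ _ (fun y _ => step1 y)).trans ?_
  refine (pv_flatMap_append_perm _ _ _).trans ?_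
  unfold pvBlock
  refine List.Perm.append (List.Perm.refl _) ?_
  rw [pv_flatMap_shift (pvH s - 1) (fun y => (PySem.List.pyRange 0 (pvW s - 2) 1).map (pvS3 s y)),
    show (pvH s - 1 + 1 : Int) = pvH s by ring]

theorem pv_LB2_perm (s : List (List Int)) :
    (pvLB2 s).Perm (pvBlock 0 (pvH s - 2) (pvW s - 1) (pvS4 s) ++ pvBlock 1 (pvH s - 1) (pvW s - 1) (pvS2 s)) := by
  unfold pvLB2
  have step1 : ∀ x : Int, ((PySem.List.pyRange 0 (pvH s - 2) 1).flatMap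
      (fun t => [pvS4 s t x, pvS2 s (t+1) x])).Perm
      ((PySem.List.pyRange 0 (pvH s - 2) 1).map (fun t => pvS4 s t x) ++
       (PySem.List.pyRange 0 (pvH s - 2) 1).map (fun t => pvS2 s (t+1) x)) := by
    intro x
    have : (fun t => [pvS4 s t x, pvS2 s (t+1) x]) = fun t => [pvS4 s t x] ++ [pvS2 s (t+1) x] := rfl
    rw [this]
    refine (pv_flatMap_append_perm _ _ _).trans ?_
    rw [pv_flatMap_pure, pv_flatMap_pure]
  refine (pv_flatMap_perm_congr _ _ _ (fun x _ => step1 x)).trans ?_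
  refine (pv_flatMap_append_perm _ _ _).trans ?_
  unfold pvBlock
  refine List.Perm.append ?_ ?_
  · exact pv_flatMap_comm _ _ (fun x t => pvS4 s t x)
  · refine (pv_flatMap_comm _ _ (fun x t => pvS2 s (t+1) x)).trans ?_
    rw [pv_flatMap_shift (pvH s - 2) (fun t => (PySem.List.pyRange 0 (pvW s - 1) 1).map (fun x => pvS2 s t x)),
      show (pvH s - 2 + 1 : Int) = pvH s - 1 by ring]

theorem pv_B_eq (s : List (List Int)) (hs : s ≠ []) :
    calShape5_alt s = (pvLB1 s ++ pvLB2 s).foldl max 0 := by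
  unfold calShape5_alt
  simp only [if_neg hs]
  show max (pvBestPairs s (pvW s))
      (pvBestPairs ((PySem.List.pyRange 0 (pvW s) 1).map (fun x =>
        (PySem.List.pyRange 0 (pvH s) 1).map (fun y => pvGrid s y x))) (pvH s))
    = (pvLB1 s ++ pvLB2 s).foldl max 0
  rw [pv_B1_eq, pv_B2_eq s, pv_max_split]

theorem pv_final_perm (s : List (List Int)) :
    (pvLB1 s ++ pvLB2 s).Perm (pvLA s) := by
  refine ((pv_LB1_perm s).append (pv_LB2_perm s)).trans ?_
  unfold pvLA
  simp only [List.append_assoc]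
  refine List.Perm.append_left _ ?_
  -- B3 ++ (B4 ++ B2)  perm  B2 ++ (B3 ++ B4)
  refine List.Perm.trans ?_ (List.perm_append_comm_assoc _ _ _).symm
  exact List.Perm.append_left _ (List.perm_append_comm)

-- ===== VERDICT (by name: the statement is the Claim_ definition above) =====
theorem calShape5_spec : Claim_equal_calShape5 := by
  intro s _ _
  unfold Spec_calShape5
  by_cases hs : s = []
  · subst hs; decide
  · rw [pv_A_eq, pv_B_eq s hs]
    have inst : RightCommutative (max : Int → Int → Int) := ⟨fun a b c => max_right_comm a b c⟩
    exact (@List.Perm.foldl_eq _ _ max _ _ inst (pv_final_perm s) 0).symm
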